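-- pv_equiv track=rewrite | github.com/Dinu-Filip/CipherChallenge | cipher_analysis.py | order_letters
-- ===== SOURCE A (Python) =====
-- def order_letters(freq_dict: dict) -> list:
--     ordered_letters = []
--     empty = True
--     for letter in freq_dict.keys():
--         if empty:
--             ordered_letters.append(letter)
--             empty = False
--         else:
--             for i in reversed(range(len(ordered_letters))):
--                 if freq_dict[ordered_letters[i]] >= freq_dict[letter]:
--                     ordered_letters.insert(i + 1, letter)
--                     break
--                 else:
--                     if i == 0:
--                         ordered_letters.insert(0, letter)
--     return ordered_letters
-- ===== SOURCE B (Python) =====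
-- def order_letters(freq_dict: dict) -> list:
--     # stable descending sort by frequency: same order A builds by repeated insertion
--     return sorted(freq_dict.keys(), key=lambda letter: freq_dict[letter], reverse=True)
-- ===== Notes on version B (the rewrite author's own statement) =====
-- stated objective: faster
-- what changed: Replaces A's hand-rolled backwards-scanning insertion sort (quadratic in the number of keys) with a single stable library sort sorted(keys, key=freq, reverse=True).
import Mathlib
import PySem

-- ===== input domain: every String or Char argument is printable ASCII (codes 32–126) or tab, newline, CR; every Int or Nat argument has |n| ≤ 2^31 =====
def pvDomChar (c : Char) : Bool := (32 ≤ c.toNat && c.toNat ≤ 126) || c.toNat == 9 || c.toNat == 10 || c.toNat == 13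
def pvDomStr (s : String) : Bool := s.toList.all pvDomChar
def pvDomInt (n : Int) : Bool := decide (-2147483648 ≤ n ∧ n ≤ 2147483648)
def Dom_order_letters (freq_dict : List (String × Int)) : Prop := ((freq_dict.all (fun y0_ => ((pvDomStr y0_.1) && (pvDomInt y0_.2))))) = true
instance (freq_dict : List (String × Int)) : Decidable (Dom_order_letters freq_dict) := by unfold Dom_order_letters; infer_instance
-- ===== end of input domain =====

-- B replaces A's quadratic backwards-scanning insertion sort by one stable reverse sort by frequency (asymptotically faster).


-- ===== PORT A =====
-- inner 'for i in reversed(range(len(ordered_letters)))' loop of A, i counting down;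
-- freq_dict[…] is d.getD … 0: its keys always come from the dict itself, so the default is never used
def insLoopA (d : PySem.Dict String Int) (ol : List String) (letter : String) : Nat → List String
  | 0 =>
      if d.getD (ol.getD 0 "") 0 ≥ d.getD letter 0 then PySem.List.insert ol ((0 + 1 : Nat) : Int) letter
      else PySem.List.insert ol 0 letter
  | (i + 1) =>
      if d.getD (ol.getD (i + 1) "") 0 ≥ d.getD letter 0 then PySem.List.insert ol ((i + 1 + 1 : Nat) : Int) letter
      else insLoopA d ol letter i

def order_letters (freq_dict : List (String × Int)) : List String :=
  ((PySem.Dict.ofList freq_dict).keys.foldl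
    (fun (st : List String × Bool) letter =>
      if st.2 then (st.1 ++ [letter], false)
      else (insLoopA (PySem.Dict.ofList freq_dict) st.1 letter (st.1.length - 1), false))
    ([], true)).1

-- ===== PORT B =====
def order_letters_alt (freq_dict : List (String × Int)) : List String :=
  PySem.List.sorted (PySem.Dict.ofList freq_dict).keys
    (fun letter => (PySem.Dict.ofList freq_dict).getD letter 0) true

-- ===== PRECONDITION & SPEC =====
def Spec_order_letters (freq_dict : List (String × Int)) (out : List String) : Prop := out = order_letters_alt freq_dict
instance (freq_dict : List (String × Int)) (out : List String) : Decidable (Spec_order_letters freq_dict out) := by unfold Spec_order_letters; infer_instance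

-- ===== CLAIM (what is proved, stated in full; the proofs are below) =====
def Claim_equal_order_letters : Prop := ∀ (freq_dict : List (String × Int)), Dom_order_letters freq_dict → Spec_order_letters freq_dict (order_letters freq_dict)

-- ===== LEMMAS AND PROOFS =====

-- insertBy inserts at the boundary position t: all earlier elements refuse 'before', the one at t accepts it
theorem insertBy_eq_take_drop {α : Type} (before : α → α → Bool) (x : α) (ys : List α) :
    ∀ (t : Nat) (ht : t ≤ ys.length),
    (∀ j (hj : j < t), before x (ys[j]'(lt_of_lt_of_le hj ht)) = false) →
    (∀ (hlt : t < ys.length), before x (ys[t]'hlt) = true) →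
    PySem.List.insertBy before x ys = ys.take t ++ x :: ys.drop t := by
  induction ys with
  | nil =>
      intro t ht _ _
      have : t = 0 := by simpa using ht
      subst this
      simp [PySem.List.insertBy]
  | cons y ys ih =>
      intro t ht h1 h2
      cases t with
      | zero =>
          have hy : before x y = true := h2 (by simp)
          simp [PySem.List.insertBy, hy]
      | succ t =>
          have hy : before x y = false := h1 0 (Nat.succ_pos t)
          have := ih t (by simpa using ht) (fun j hj => h1 (j + 1) (by omega)) (fun hlt => h2 (by simp only [List.length_cons]; omega))
          simp [PySem.List.insertBy, hy, this]

theorem insertBy_ne_nil {α : Type} (before : α → α → Bool) (x : α) (ys : List α) :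
    PySem.List.insertBy before x ys ≠ [] := by
  cases ys with
  | nil => simp [PySem.List.insertBy]
  | cons y ys => by_cases h : before x y = true <;> simp [PySem.List.insertBy, h]

-- inserting with the reverse-order predicate preserves "sorted descending by key"
theorem insertBy_pairwise {α : Type} (key : α → Int) (x : α) (ys : List α)
    (h : ys.Pairwise (fun a b => key b ≤ key a)) :
    (PySem.List.insertBy (fun a b => decide (key b < key a)) x ys).Pairwise
      (fun a b => key b ≤ key a) := by
  induction ys with
  | nil => simp [PySem.List.insertBy]
  | cons y ys ih =>
      rcases List.pairwise_cons.1 h with ⟨hy, hys⟩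
      by_cases hb : key y < key x
      · have hall : ∀ z ∈ y :: ys, key z ≤ key x := by
          intro z hz
          rcases List.mem_cons.1 hz with rfl | hz
          · exact le_of_lt hb
          · exact le_trans (hy z hz) (le_of_lt hb)
        simp only [PySem.List.insertBy, decide_eq_true_eq, if_pos hb]
        exact List.pairwise_cons.2 ⟨hall, h⟩
      · simp only [PySem.List.insertBy, decide_eq_true_eq, if_neg hb]
        refine List.pairwise_cons.2 ⟨?_, ih hys⟩
        intro z hz
        rcases (PySem.List.mem_insertBy _ _ _ _).1 hz with rfl | hz
        · exact le_of_not_gt hb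
        · exact hy z hz

-- A's backwards scan computes exactly insertBy's position, on a descending list
theorem insLoopA_eq (d : PySem.Dict String Int) (ol : List String) (letter : String)
    (hs : ol.Pairwise (fun a b => d.getD b 0 ≤ d.getD a 0)) :
    ∀ (i : Nat), i < ol.length →
    (∀ j (hj : j < ol.length), i < j → d.getD (ol[j]'hj) 0 < d.getD letter 0) →
    insLoopA d ol letter i =
      PySem.List.insertBy (fun a b => decide (d.getD b 0 < d.getD a 0)) letter ol := by
  intro i
  induction i with
  | zero =>
      intro hi hafter
      have hget : ol.getD 0 "" = ol[0]'hi := by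
        rw [List.getD_eq_getElem?_getD, List.getElem?_eq_getElem hi]; rfl
      by_cases hc : d.getD (ol.getD 0 "") 0 ≥ d.getD letter 0
      · simp only [insLoopA, if_pos hc]
        rw [hget] at hc
        rw [PySem.List.insert_natCast ol 1 letter (by omega)]
        refine (insertBy_eq_take_drop _ _ ol 1 (by omega) ?_ ?_).symm
        · intro j hj
          interval_cases j
          simpa using not_lt.2 hc
        · intro hlt
          simp only [decide_eq_true_eq]
          exact hafter 1 hlt Nat.zero_lt_one
      · simp only [insLoopA, if_neg hc]
        rw [hget] at hc
        rw [PySem.List.insert_zero]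
        refine (insertBy_eq_take_drop _ _ ol 0 (Nat.zero_le _) (by omega) ?_).symm
        intro hlt
        simpa using lt_of_not_ge hc
  | succ i ih =>
      intro hi hafter
      have hget : ol.getD (i + 1) "" = ol[i + 1]'hi := by
        rw [List.getD_eq_getElem?_getD, List.getElem?_eq_getElem hi]; rfl
      by_cases hc : d.getD (ol.getD (i + 1) "") 0 ≥ d.getD letter 0
      · simp only [insLoopA, if_pos hc]
        rw [hget] at hc
        rw [PySem.List.insert_natCast ol (i + 1 + 1) letter (by omega)]
        refine (insertBy_eq_take_drop _ _ ol (i + 1 + 1) (by omega) ?_ ?_).symm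
        · intro j hj
          have hj' : j < ol.length := by omega
          have hmono : d.getD (ol[i + 1]'hi) 0 ≤ d.getD (ol[j]'hj') 0 := by
            rcases Nat.lt_or_ge j (i + 1) with h | h
            · exact (List.pairwise_iff_getElem.1 hs) j (i + 1) hj' hi h
            · have : j = i + 1 := by omega
              subst this; exact le_rfl
          simp only [decide_eq_false_iff_not]
          omega
        · intro hlt
          simp only [decide_eq_true_eq]
          exact hafter (i + 1 + 1) hlt (by omega)
      · simp only [insLoopA, if_neg hc]
        rw [hget] at hc
        refine ih (by omega) ?_
        intro j hj hij
        rcases Nat.lt_or_ge (i + 1) j with h | h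
        · exact hafter j hj h
        · have : j = i + 1 := by omega
          subst this
          exact lt_of_not_ge hc

-- the non-empty tail of A's outer loop is the insertBy fold
theorem foldA_eq (d : PySem.Dict String Int) :
    ∀ (ks : List String) (ol : List String), ol ≠ [] →
    ol.Pairwise (fun a b => d.getD b 0 ≤ d.getD a 0) →
    (ks.foldl
      (fun (st : List String × Bool) letter =>
        if st.2 then (st.1 ++ [letter], false)
        else (insLoopA d st.1 letter (st.1.length - 1), false))
      (ol, false)).1
    = ks.foldl (fun acc x => PySem.List.insertBy (fun a b => decide (d.getD b 0 < d.getD a 0)) x acc) ol := by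
  intro ks
  induction ks with
  | nil => intro ol _ _; rfl
  | cons k ks ih =>
      intro ol hne hs
      have hlen : ol.length - 1 < ol.length := by
        have : 0 < ol.length := List.length_pos_iff.2 hne
        omega
      have hstep := insLoopA_eq d ol k hs (ol.length - 1) hlen (fun j hj hij => absurd hj (by omega))
      rw [List.foldl_cons, List.foldl_cons, if_neg (by simp), hstep]
      exact ih _ (insertBy_ne_nil _ _ _) (insertBy_pairwise _ _ _ hs)

-- ===== VERDICT (by name: the statement is the Claim_ definition above) =====
theorem order_letters_spec : Claim_equal_order_letters := by
  intro freq_dict _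
  unfold Spec_order_letters order_letters order_letters_alt
  rw [PySem.List.sorted_rev_eq_foldl_insertBy]
  cases h : (PySem.Dict.ofList freq_dict).keys with
  | nil => rfl
  | cons k ks =>
      exact foldA_eq (PySem.Dict.ofList freq_dict) ks [k] (by simp) (by simp)
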